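-- pv_equiv track=rewrite | github.com/NathanCQC/pyGUGA | pyguga/graph/distinct_row_table.py | _get_node_dict
-- ===== SOURCE A (Python) =====
-- def _get_node_dict(n_tot: int) -> dict[tuple[int, int, int, int], int]:
--     """Return a dictionary of all possible nodes in the graph.
--
--     Args:
--         n_tot: Number of spatial orbitals.
--
--     Returns:
--         A dictionary with keys as 4-tuples (a, b, c, n) and values as integers
--         representing the nodes of the graph.
--
--     """
--
--     def all_tuples_sum_n(n: int):
--         """Return all 3-element tuples (a, b, c) such that a+b+c = n."""
--         results: list[tuple[int, int, int]] = []
--         for a in range(n + 1):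
--             for b in range(n + 1):
--                 for c in range(n + 1):
--                     if a + b + c == n:
--                         results.append((a, b, c))
--         return list(reversed(results))
--
--     abc_node_dict: dict[tuple[int, int, int, int], int] = {}
--     j = 0
--     for n in range(n_tot + 1):
--         for a, b, c in all_tuples_sum_n(n):
--             abc_node_dict[(a, b, c, n)] = j
--             j += 1
--
--     return abc_node_dict
-- ===== SOURCE B (Python) =====
-- def _get_node_dict(n_tot: int) -> dict[tuple[int, int, int, int], int]:
--     """Return a dictionary of all possible nodes in the graph.
--
--     For each n, enumerate (a, b) directly with a descending from n and b
--     descending from n - a, and set c = n - a - b; this reproduces A's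
--     reversed-lexicographic order without the cubic scan per n.
--     """
--     abc_node_dict: dict[tuple[int, int, int, int], int] = {}
--     j = 0
--     for n in range(n_tot + 1):
--         for a in range(n, -1, -1):
--             for b in range(n - a, -1, -1):
--                 abc_node_dict[(a, b, n - a - b, n)] = j
--                 j += 1
--     return abc_node_dict
-- ===== Notes on version B (the rewrite author's own statement) =====
-- stated objective: faster
-- what changed: Replaces the per-n cubic triple loop with equality filter plus list reversal by a direct descending double loop over (a, b) with c computed as n-a-b, emitting keys in the same order.
import Mathlib
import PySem

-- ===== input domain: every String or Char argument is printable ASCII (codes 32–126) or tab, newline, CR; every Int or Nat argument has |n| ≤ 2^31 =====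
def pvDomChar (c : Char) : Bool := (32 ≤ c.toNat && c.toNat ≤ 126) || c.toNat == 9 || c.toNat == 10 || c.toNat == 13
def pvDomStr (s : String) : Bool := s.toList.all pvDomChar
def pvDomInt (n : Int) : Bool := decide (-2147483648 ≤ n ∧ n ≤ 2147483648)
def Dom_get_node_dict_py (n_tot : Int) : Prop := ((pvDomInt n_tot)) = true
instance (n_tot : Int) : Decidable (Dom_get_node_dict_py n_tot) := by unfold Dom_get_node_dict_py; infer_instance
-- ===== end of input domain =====

-- B replaces A's cubic filtered triple scan per n by a descending double loop computing c = n-a-b directly (same output order); objective: faster.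

-- ===== PORT A =====
-- helper all_tuples_sum_n: triple loop collecting (a,b,c) with a+b+c = n, then reversed
def pvAllTuplesSumN (n : Int) : List (Int × Int × Int) :=
  ((PySem.List.pyRange 0 (n + 1) 1).foldl (fun results a =>
    (PySem.List.pyRange 0 (n + 1) 1).foldl (fun results b =>
      (PySem.List.pyRange 0 (n + 1) 1).foldl (fun results c =>
        if a + b + c == n then results ++ [(a, b, c)] else results) results) results) []).reverse

def get_node_dict_py (n_tot : Int) : List (List Int × Int) :=
  (((PySem.List.pyRange 0 (n_tot + 1) 1).foldl
      (fun (st : PySem.Dict (List Int) Int × Int) n =>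
        (pvAllTuplesSumN n).foldl
          (fun st t => (st.1.insert [t.1, t.2.1, t.2.2, n] st.2, st.2 + 1)) st)
      (PySem.Dict.empty, 0)).1).items

-- ===== PORT B =====
def get_node_dict_py_alt (n_tot : Int) : List (List Int × Int) :=
  (((PySem.List.pyRange 0 (n_tot + 1) 1).foldl
      (fun (st : PySem.Dict (List Int) Int × Int) n =>
        (PySem.List.pyRange n (-1) (-1)).foldl
          (fun st a =>
            (PySem.List.pyRange (n - a) (-1) (-1)).foldl
              (fun st b => (st.1.insert [a, b, n - a - b, n] st.2, st.2 + 1)) st) st)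
      (PySem.Dict.empty, 0)).1).items

-- ===== PRECONDITION & SPEC =====
def Spec_get_node_dict_py (n_tot : Int) (out : List (List Int × Int)) : Prop := out = get_node_dict_py_alt n_tot
instance (n_tot : Int) (out : List (List Int × Int)) : Decidable (Spec_get_node_dict_py n_tot out) := by unfold Spec_get_node_dict_py; infer_instance

-- ===== CLAIM (what is proved, stated in full; the proofs are below) =====
def Claim_equal_get_node_dict_py : Prop := ∀ (n_tot : Int), Dom_get_node_dict_py n_tot → Spec_get_node_dict_py n_tot (get_node_dict_py n_tot)

-- ===== LEMMAS AND PROOFS =====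

-- the per-key insertion step both ports perform
def pvStep (st : PySem.Dict (List Int) Int × Int) (k : List Int) : PySem.Dict (List Int) Int × Int :=
  (st.1.insert k st.2, st.2 + 1)

def pvKey (n : Int) (t : Int × Int × Int) : List Int := [t.1, t.2.1, t.2.2, n]

lemma pv_revR (n : Int) :
    (PySem.List.pyRange 0 (n + 1) 1).reverse = PySem.List.pyRange n (-1) (-1) := by
  rw [PySem.List.pyRange_neg_one_eq_reverse]
  norm_num

lemma pv_filter_singleton (lo hi v : Int) :
    (PySem.List.pyRange lo hi 1).filter (fun c => c == v)
      = if lo ≤ v ∧ v < hi then [v] else [] := by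
  by_cases h : lo ≤ v ∧ v < hi
  · rw [if_pos h, List.filter_beq,
      List.count_eq_one_of_mem (PySem.List.nodup_pyRange_one lo hi)
        (PySem.List.mem_pyRange_one.mpr h)]
    rfl
  · rw [if_neg h, List.filter_beq,
      List.count_eq_zero_of_not_mem (fun hm => h (PySem.List.mem_pyRange_one.mp hm))]
    rfl

lemma pv_leaf (n a b : Int) :
    (((((PySem.List.pyRange 0 (n + 1) 1).filter (fun c => a + b + c == n)).map
        (fun c => (a, b, c))).map (pvKey n)).reverse)
      = if 0 ≤ n - a - b ∧ n - a - b ≤ n then [[a, b, n - a - b, n]] else [] := by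
  have hp : (PySem.List.pyRange 0 (n + 1) 1).filter (fun c => a + b + c == n)
      = (PySem.List.pyRange 0 (n + 1) 1).filter (fun c => c == n - a - b) := by
    apply List.filter_congr
    intro x _
    rw [Bool.eq_iff_iff]
    simp only [beq_iff_eq]
    omega
  rw [hp, pv_filter_singleton]
  by_cases h : (0 : Int) ≤ n - a - b ∧ n - a - b < n + 1
  · rw [if_pos h, if_pos ⟨h.1, by omega⟩]
    simp [pvKey]
  · rw [if_neg h, if_neg (by omega)]
    simp

lemma pv_flatMap_const_nil {α β : Type} (l : List α) :
    l.flatMap (fun _ => ([] : List β)) = [] := by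
  induction l with
  | nil => rfl
  | cons x xs ih => simp [ih]

lemma pv_flatMap_singleton {α β : Type} (f : α → β) (l : List α) :
    l.flatMap (fun b => [f b]) = l.map f := by
  induction l with
  | nil => rfl
  | cons x xs ih => simp [ih]

lemma pv_inner (n a : Int) (ha0 : 0 ≤ a) (han : a ≤ n) :
    (PySem.List.pyRange n (-1) (-1)).flatMap
        (fun b => if 0 ≤ n - a - b ∧ n - a - b ≤ n then [[a, b, n - a - b, n]] else [])
      = (PySem.List.pyRange (n - a) (-1) (-1)).map (fun b => [a, b, n - a - b, n]) := by
  rw [← pv_revR n, ← pv_revR (n - a),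
    PySem.List.pyRange_one_append 0 (n - a + 1) (n + 1) (by omega) (by omega),
    List.reverse_append, List.flatMap_append]
  have h1 : ((PySem.List.pyRange (n - a + 1) (n + 1) 1).reverse).flatMap
      (fun b => if 0 ≤ n - a - b ∧ n - a - b ≤ n then [[a, b, n - a - b, n]] else [])
      = ((PySem.List.pyRange (n - a + 1) (n + 1) 1).reverse).flatMap
          (fun _ => ([] : List (List Int))) := by
    apply List.flatMap_congr
    intro b hb
    rw [List.mem_reverse, PySem.List.mem_pyRange_one] at hb
    rw [if_neg (by omega)]
  have h2 : ((PySem.List.pyRange 0 (n - a + 1) 1).reverse).flatMap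
      (fun b => if 0 ≤ n - a - b ∧ n - a - b ≤ n then [[a, b, n - a - b, n]] else [])
      = ((PySem.List.pyRange 0 (n - a + 1) 1).reverse).flatMap
          (fun b => [[a, b, n - a - b, n]]) := by
    apply List.flatMap_congr
    intro b hb
    rw [List.mem_reverse, PySem.List.mem_pyRange_one] at hb
    rw [if_pos (by omega)]
  rw [h1, h2, pv_flatMap_const_nil, pv_flatMap_singleton, List.map_reverse]
  rfl

lemma pv_keys_eq (n : Int) :
    (pvAllTuplesSumN n).map (pvKey n)
      = (PySem.List.pyRange n (-1) (-1)).flatMap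
          (fun a => (PySem.List.pyRange (n - a) (-1) (-1)).map (fun b => [a, b, n - a - b, n])) := by
  unfold pvAllTuplesSumN
  simp only [PySem.List.foldl_append_if, PySem.List.foldl_append_eq_flatMap, List.nil_append]
  rw [List.map_reverse]
  simp only [List.map_flatMap, List.reverse_flatMap, Function.comp_def]
  simp only [pv_leaf, pv_revR]
  apply List.flatMap_congr
  intro a ha
  rw [PySem.List.mem_pyRange_neg_one] at ha
  exact pv_inner n a (by omega) ha.2

-- ===== VERDICT (by name: the statement is the Claim_ definition above) =====
theorem get_node_dict_py_spec : Claim_equal_get_node_dict_py := by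
  intro n_tot _
  unfold Spec_get_node_dict_py get_node_dict_py get_node_dict_py_alt
  refine congrArg (fun st : PySem.Dict (List Int) Int × Int => st.1.items) ?_
  apply PySem.List.foldl_congr_mem
  intro st n _
  have hA : (pvAllTuplesSumN n).foldl
      (fun st t => (st.1.insert [t.1, t.2.1, t.2.2, n] st.2, st.2 + 1)) st
      = ((pvAllTuplesSumN n).map (pvKey n)).foldl pvStep st := by
    rw [List.foldl_map]
    rfl
  have hB : (PySem.List.pyRange n (-1) (-1)).foldl
      (fun st a =>
        (PySem.List.pyRange (n - a) (-1) (-1)).foldl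
          (fun st b => (st.1.insert [a, b, n - a - b, n] st.2, st.2 + 1)) st) st
      = ((PySem.List.pyRange n (-1) (-1)).flatMap
          (fun a => (PySem.List.pyRange (n - a) (-1) (-1)).map (fun b => [a, b, n - a - b, n]))).foldl
          pvStep st := by
    rw [List.foldl_flatMap]
    simp only [List.foldl_map]
    rfl
  rw [hA, hB, pv_keys_eq n]
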